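-- pv_equiv track=rewrite | github.com/akshay-greenlang/Code-V1_GreenLang | _archive/07_fy29_plus_premature_packs/energy-efficiency/PACK-040-mv/integrations/setup_wizard.py | _validate_step_data
-- ===== SOURCE A (Python) =====
-- from enum import Enum
-- from typing import Any, Dict, List, Optional
--
-- class WizardStep(str, Enum):
--     """Names of setup wizard steps in execution order."""
--
--     PROJECT_PROFILE = "project_profile"
--     ECM_INVENTORY = "ecm_inventory"
--     BASELINE_PERIOD = "baseline_period"
--     METER_CONFIG = "meter_config"
--     OPTION_SELECTION = "option_selection"
--     ADJUSTMENT_PLAN = "adjustment_plan"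
--     REPORTING_SCHEDULE = "reporting_schedule"
--     COMPLIANCE_FRAMEWORK = "compliance_framework"
--     REVIEW_CONFIRM = "review_confirm"
--
-- class IPMVPOptionWZ(str, Enum):
--     """IPMVP options for wizard selection."""
--
--     OPTION_A = "option_a"
--     OPTION_B = "option_b"
--     OPTION_C = "option_c"
--     OPTION_D = "option_d"
--
-- def _validate_step_data(
--     step: WizardStep, data: Dict[str, Any]
-- ) -> List[str]:
--     """Validate step data.
--
--     Args:
--         step: Step being validated.
--         data: Data to validate.
--
--     Returns:
--         List of validation error messages.
--     """
--     errors: List[str] = []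
--
--     if step == WizardStep.PROJECT_PROFILE:
--         if not data.get("project_name"):
--             errors.append("Project name is required")
--         if not data.get("facility_type"):
--             errors.append("Facility type is required")
--
--     elif step == WizardStep.BASELINE_PERIOD:
--         if not data.get("baseline_start"):
--             errors.append("Baseline start date is required")
--         if not data.get("baseline_end"):
--             errors.append("Baseline end date is required")
--
--     elif step == WizardStep.OPTION_SELECTION:
--         option = data.get("ipmvp_option", "")
--         if option and option not in [o.value for o in IPMVPOptionWZ]:
--             errors.append(f"Invalid IPMVP option: {option}")
--
--     return errors
-- ===== SOURCE B (Python) =====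
-- from enum import Enum
--
-- class WizardStep(str, Enum):
--     PROJECT_PROFILE = "project_profile"
--     ECM_INVENTORY = "ecm_inventory"
--     BASELINE_PERIOD = "baseline_period"
--     METER_CONFIG = "meter_config"
--     OPTION_SELECTION = "option_selection"
--     ADJUSTMENT_PLAN = "adjustment_plan"
--     REPORTING_SCHEDULE = "reporting_schedule"
--     COMPLIANCE_FRAMEWORK = "compliance_framework"
--     REVIEW_CONFIRM = "review_confirm"
--
-- class IPMVPOptionWZ(str, Enum):
--     OPTION_A = "option_a"
--     OPTION_B = "option_b"
--     OPTION_C = "option_c"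
--     OPTION_D = "option_d"
--
-- # Table-driven rewrite: required-field steps are data, not branches.
-- _REQUIRED = {
--     WizardStep.PROJECT_PROFILE: [
--         ("project_name", "Project name is required"),
--         ("facility_type", "Facility type is required"),
--     ],
--     WizardStep.BASELINE_PERIOD: [
--         ("baseline_start", "Baseline start date is required"),
--         ("baseline_end", "Baseline end date is required"),
--     ],
-- }
-- _VALID_OPTIONS = frozenset(o.value for o in IPMVPOptionWZ)
--
-- def _validate_step_data(step, data):
--     if step == WizardStep.OPTION_SELECTION:
--         option = data.get("ipmvp_option", "")
--         if option and option not in _VALID_OPTIONS: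
--             return [f"Invalid IPMVP option: {option}"]
--         return []
--     return [msg for key, msg in _REQUIRED.get(step, []) if not data.get(key)]
-- ===== Notes on version B (the rewrite author's own statement) =====
-- stated objective: simpler
-- what changed: Replaced the if/elif chain of per-step hard-coded checks with a module-level table mapping step -> (field, message) pairs driven by one comprehension, with OPTION_SELECTION as the single remaining branch.
import Mathlib
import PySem

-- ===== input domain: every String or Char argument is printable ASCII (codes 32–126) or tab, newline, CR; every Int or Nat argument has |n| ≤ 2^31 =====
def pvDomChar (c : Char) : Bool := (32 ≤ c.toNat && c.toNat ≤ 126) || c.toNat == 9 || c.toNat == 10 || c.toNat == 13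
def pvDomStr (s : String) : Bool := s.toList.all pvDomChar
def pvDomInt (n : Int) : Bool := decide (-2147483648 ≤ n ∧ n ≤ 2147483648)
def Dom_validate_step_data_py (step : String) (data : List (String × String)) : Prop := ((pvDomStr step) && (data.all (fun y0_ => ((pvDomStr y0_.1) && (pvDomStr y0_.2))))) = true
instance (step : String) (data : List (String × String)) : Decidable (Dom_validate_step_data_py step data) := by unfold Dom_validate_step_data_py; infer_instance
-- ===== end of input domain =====

-- B replaces A's if/elif chain of hard-coded field checks with a step -> (field, message)
-- lookup table scanned in one pass (objective: simpler).

-- ===== PORT A =====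
-- Port of A's if/elif chain; data.get(k) with falsy test = lookup-or-"" compared to "".
def validate_step_data_py (step : String) (data : List (String × String)) : List String :=
  let errors : List String := []
  if step == "project_profile" then
    let errors := if (PySem.Dict.mk data).getD "project_name" "" == "" then errors ++ ["Project name is required"] else errors
    let errors := if (PySem.Dict.mk data).getD "facility_type" "" == "" then errors ++ ["Facility type is required"] else errors
    errors
  else if step == "baseline_period" then
    let errors := if (PySem.Dict.mk data).getD "baseline_start" "" == "" then errors ++ ["Baseline start date is required"] else errors
    let errors := if (PySem.Dict.mk data).getD "baseline_end" "" == "" then errors ++ ["Baseline end date is required"] else errors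
    errors
  else if step == "option_selection" then
    let option := (PySem.Dict.mk data).getD "ipmvp_option" ""
    if option != "" && !(["option_a", "option_b", "option_c", "option_d"].contains option) then
      errors ++ ["Invalid IPMVP option: " ++ option]
    else errors
  else errors

-- ===== PORT B =====
-- the _REQUIRED table of Source B
def pvReqTable : List (String × List (String × String)) :=
  [("project_profile", [("project_name", "Project name is required"),
                        ("facility_type", "Facility type is required")]),
   ("baseline_period", [("baseline_start", "Baseline start date is required"),
                        ("baseline_end", "Baseline end date is required")])]

def validate_step_data_py_alt (step : String) (data : List (String × String)) : List String :=
  if step == "option_selection" then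
    let option := (PySem.Dict.mk data).getD "ipmvp_option" ""
    if option != "" && !(["option_a", "option_b", "option_c", "option_d"].contains option) then
      ["Invalid IPMVP option: " ++ option]
    else []
  else
    ((PySem.Dict.mk pvReqTable).getD step []).filterMap
      (fun p => if (PySem.Dict.mk data).getD p.1 "" == "" then some p.2 else none)

-- ===== PRECONDITION & SPEC =====
def Spec_validate_step_data_py (step : String) (data : List (String × String)) (out : List String) : Prop := out = validate_step_data_py_alt step data
instance (step : String) (data : List (String × String)) (out : List String) : Decidable (Spec_validate_step_data_py step data out) := by unfold Spec_validate_step_data_py; infer_instance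

-- ===== CLAIM (what is proved, stated in full; the proofs are below) =====
def Claim_equal_validate_step_data_py : Prop := ∀ (step : String) (data : List (String × String)), Dom_validate_step_data_py step data → Spec_validate_step_data_py step data (validate_step_data_py step data)

-- ===== LEMMAS AND PROOFS =====

-- ===== VERDICT (by name: the statement is the Claim_ definition above) =====
theorem validate_step_data_py_spec : Claim_equal_validate_step_data_py := by
  intro step data _
  unfold Spec_validate_step_data_py validate_step_data_py validate_step_data_py_alt
  by_cases h1 : step = "project_profile"
  · subst h1
    simp [pvReqTable, PySem.Dict.getD, PySem.Dict.get?_mk_cons, List.filterMap]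
    split_ifs <;> simp
  · by_cases h2 : step = "baseline_period"
    · subst h2
      simp [pvReqTable, PySem.Dict.getD, PySem.Dict.get?_mk_cons, List.filterMap]
      split_ifs <;> simp
    · by_cases h3 : step = "option_selection"
      · subst h3; simp
      · rw [if_neg (by simp [h1]), if_neg (by simp [h2]), if_neg (by simp [h3])]
        simp [pvReqTable, PySem.Dict.getD, PySem.Dict.get?,
              h3, Ne.symm h1, Ne.symm h2]
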